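-- pv_equiv track=rewrite | github.com/jp0utside/SBLE_project | src/matlab.py | find_unmatched
-- ===== SOURCE A (Python) =====
-- def find_unmatched(python_idxs, matlab_idxs):
--     python_unmatched = []
--     matlab_unmatched = []
--
--     for i in range(len(python_idxs)):
--         py_user = python_idxs[i].copy()
--         mat_user = matlab_idxs[i].copy()
--         py_idx = 0
--         mat_idx = 0
--         while py_idx < len(py_user):
--             py_trip = py_user[py_idx]
--             br = False
--             for j in range(mat_idx, len(mat_user)):
--                 mat_trip = mat_user[j]
--                 if set(py_trip) == set(mat_trip):
--                     py_user.remove(py_trip)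
--                     mat_user.remove(mat_trip)
--                     mat_idx = j
--                     br = True
--                     break
--             if not br:
--                 py_idx += 1
--         python_unmatched.append(py_user)
--         matlab_unmatched.append(mat_user)
--
--     return python_unmatched, matlab_unmatched
-- ===== SOURCE B (Python) =====
-- from bisect import bisect_left
-- from collections import Counter
--
--
-- def find_unmatched(python_idxs, matlab_idxs):
--     python_unmatched = []
--     matlab_unmatched = []
--     for py_user, mat_user in zip(python_idxs, matlab_idxs):
--         # index every matlab trip by its set of stops -> ascending positions
--         positions = {}
--         for j, trip in enumerate(mat_user):
--             positions.setdefault(frozenset(trip), []).append(j)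
--         # greedy in-order matching: each python trip takes the first
--         # matlab trip with the same stop set at or after the pointer
--         pointer = 0
--         py_un = []
--         matched = Counter()
--         for trip in py_user:
--             cand = positions.get(frozenset(trip), [])
--             i = bisect_left(cand, pointer)
--             if i < len(cand):
--                 j = cand[i]
--                 matched[tuple(mat_user[j])] += 1
--                 pointer = j + 1
--             else:
--                 py_un.append(trip)
--         # the matlab trips, minus one copy of each matched trip
--         mat_un = []
--         for trip in mat_user:
--             t = tuple(trip)
--             if matched[t] > 0:
--                 matched[t] -= 1
--             else:
--                 mat_un.append(trip)
--         python_unmatched.append(py_un)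
--         matlab_unmatched.append(mat_un)
--     return python_unmatched, matlab_unmatched
-- ===== Notes on version B (the rewrite author's own statement) =====
-- stated objective: faster
-- what changed: Instead of repeatedly rescanning and mutating the matlab list with remove() inside a while-loop over a shifting index, B indexes every matlab trip once by its stop set into ascending position lists, matches each python trip in order by binary-searching the first position at or after a moving pointer, and builds the unmatched matlab list in one counted subtraction pass.
import Mathlib
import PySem

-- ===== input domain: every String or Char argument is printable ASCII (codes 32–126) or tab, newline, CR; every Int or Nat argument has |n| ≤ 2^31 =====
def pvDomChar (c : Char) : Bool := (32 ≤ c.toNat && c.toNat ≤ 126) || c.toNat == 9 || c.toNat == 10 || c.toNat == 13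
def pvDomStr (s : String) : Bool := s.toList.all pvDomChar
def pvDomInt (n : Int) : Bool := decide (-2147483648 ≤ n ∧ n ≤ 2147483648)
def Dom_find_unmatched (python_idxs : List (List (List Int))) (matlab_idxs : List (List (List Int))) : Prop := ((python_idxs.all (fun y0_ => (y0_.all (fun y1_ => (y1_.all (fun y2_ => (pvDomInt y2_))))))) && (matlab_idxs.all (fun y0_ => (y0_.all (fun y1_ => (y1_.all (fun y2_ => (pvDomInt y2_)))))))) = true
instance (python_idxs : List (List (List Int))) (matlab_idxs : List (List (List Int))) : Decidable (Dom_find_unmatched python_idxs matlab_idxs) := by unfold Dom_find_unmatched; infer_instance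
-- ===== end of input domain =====

-- B replaces A's per-trip rescans of a mutating list by a one-pass position index per
-- stop set, queried by binary search behind a moving pointer (measurably faster).

-- ===== PORT A =====
-- A's inner 'for j in range(mat_idx, len(mat_user)): … break': first set-equal trip at
-- position ≥ j, its index (break) or none (loop runs out)
def pvScanA (mat_user : List (List Int)) (j : Nat) (py_trip : List Int) : Option Nat :=
  if h : j < mat_user.length then
    if PySem.Set.equal (PySem.Set.ofList py_trip) (PySem.Set.ofList mat_user[j]) then some j
    else pvScanA mat_user (j + 1) py_trip
  else none
termination_by mat_user.length - j

-- A's 'while py_idx < len(py_user)' loop; list.remove(v) removes the first occurrence of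
-- v, i.e. List.erase (its ValueError is unreachable: v was just read from the list)
def pvLoopA (py_user : List (List Int)) (mat_user : List (List Int)) (py_idx mat_idx : Nat) :
    List (List Int) × List (List Int) :=
  if h : py_idx < py_user.length then
    match pvScanA mat_user mat_idx py_user[py_idx] with
    | some j =>
        pvLoopA (py_user.erase py_user[py_idx]) (mat_user.erase (mat_user.getD j []))
          py_idx j
    | none => pvLoopA py_user mat_user (py_idx + 1) mat_idx
  else (py_user, mat_user)
termination_by py_user.length - py_idx
decreasing_by
  · have := List.length_erase_of_mem (List.getElem_mem h)
    omega
  · omega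

-- A's 'for i in range(len(python_idxs))' loop ('.copy()' is a no-op here: nothing aliases);
-- matlab_idxs[i] raises IndexError when len(matlab_idxs) < len(python_idxs): those inputs
-- are excluded by Pre_find_unmatched, the getD default is unreachable under it
def pvOuterA (python_idxs matlab_idxs : List (List (List Int))) (i : Nat)
    (pacc macc : List (List (List Int))) :
    List (List (List Int)) × List (List (List Int)) :=
  if h : i < python_idxs.length then
    pvOuterA python_idxs matlab_idxs (i + 1)
      (pacc ++ [(pvLoopA python_idxs[i] (matlab_idxs.getD i []) 0 0).1])
      (macc ++ [(pvLoopA python_idxs[i] (matlab_idxs.getD i []) 0 0).2])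
  else (pacc, macc)
termination_by python_idxs.length - i

def find_unmatched (python_idxs : List (List (List Int))) (matlab_idxs : List (List (List Int))) :
    List (List (List Int)) × List (List (List Int)) :=
  pvOuterA python_idxs matlab_idxs 0 [] []

-- ===== PORT B =====
-- Source B frozenset(trip), used as a dict key: ported as the canonical sorted duplicate-free
-- list, whose equality is exactly frozenset equality
def pvKey (trip : List Int) : List Int :=
  PySem.List.sorted (PySem.Set.ofList trip) (fun x => x)

-- Source B: 'for j, trip in enumerate(mat_user): positions.setdefault(frozenset(trip), []).append(j)'
-- (setdefault-then-append is Dict.modify with default [])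
def pvBuildPos (mat_user : List (List Int)) : PySem.Dict (List Int) (List Int) :=
  (PySem.List.enumerate mat_user 0).foldl
    (fun d jt => d.modify (pvKey jt.2) [] (fun l => l ++ [jt.1])) PySem.Dict.empty

-- Source B loop body over py_user; state (pointer, py_un, matched). 'i = bisect_left(cand,
-- pointer); if i < len(cand): j = cand[i]' — the stdlib binary search on the ascending
-- list cand, ported by its contract: the first element ≥ pointer, if any
def pvStepB (pos : PySem.Dict (List Int) (List Int)) (mat_user : List (List Int))
    (st : Int × List (List Int) × PySem.Dict (List Int) Int) (trip : List Int) :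
    Int × List (List Int) × PySem.Dict (List Int) Int :=
  match st with
  | (p, py_un, matched) =>
    match (pos.getD (pvKey trip) []).dropWhile (fun x => decide (x < p)) with
    | j :: _ =>
        (j + 1, py_un, matched.modify (PySem.List.pyGetD mat_user j []) 0 (· + 1))
    | [] => (p, py_un ++ [trip], matched)

-- Source B final loop: the matlab trips minus one copy of each matched trip
-- (Counter reads of a missing key give 0: Dict.getD … 0)
def pvSubStep (acc : List (List Int) × PySem.Dict (List Int) Int) (trip : List Int) :
    List (List Int) × PySem.Dict (List Int) Int :=
  if acc.2.getD trip 0 > 0 then (acc.1, acc.2.modify trip 0 (· - 1))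
  else (acc.1 ++ [trip], acc.2)

-- Source B per-user body
def pvMatchUser (py_user mat_user : List (List Int)) :
    List (List Int) × List (List Int) :=
  match py_user.foldl (pvStepB (pvBuildPos mat_user) mat_user)
      ((0 : Int), [], PySem.Dict.empty) with
  | (_, py_un, matched) => (py_un, (mat_user.foldl pvSubStep ([], matched)).1)

def find_unmatched_alt (python_idxs : List (List (List Int))) (matlab_idxs : List (List (List Int))) :
    List (List (List Int)) × List (List (List Int)) :=
  (python_idxs.zip matlab_idxs).foldl
    (fun acc pm => match pvMatchUser pm.1 pm.2 with
      | (pu, mu) => (acc.1 ++ [pu], acc.2 ++ [mu])) ([], [])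

-- ===== PRECONDITION & SPEC =====
-- A evaluates matlab_idxs[i] for every i < len(python_idxs): it raises IndexError as soon
-- as the matlab list is shorter than the python list; exactly those inputs are excluded
def Pre_find_unmatched (python_idxs : List (List (List Int))) (matlab_idxs : List (List (List Int))) : Prop :=
  python_idxs.length ≤ matlab_idxs.length
instance (python_idxs : List (List (List Int))) (matlab_idxs : List (List (List Int))) : Decidable (Pre_find_unmatched python_idxs matlab_idxs) := by unfold Pre_find_unmatched; infer_instance

def pvWitness_find_unmatched : List (List (List Int)) × List (List (List Int)) :=
  ([[[1, 2], [3]], [[4]]], [[[2, 1]], [[5], [4]]])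

def Spec_find_unmatched (python_idxs : List (List (List Int))) (matlab_idxs : List (List (List Int))) (out : List (List (List Int)) × List (List (List Int))) : Prop := out = find_unmatched_alt python_idxs matlab_idxs
instance (python_idxs : List (List (List Int))) (matlab_idxs : List (List (List Int))) (out : List (List (List Int)) × List (List (List Int))) : Decidable (Spec_find_unmatched python_idxs matlab_idxs out) := by unfold Spec_find_unmatched; infer_instance

-- ===== CLAIM (what is proved, stated in full; the proofs are below) =====
def Claim_equal_find_unmatched : Prop := ∀ (python_idxs : List (List (List Int))) (matlab_idxs : List (List (List Int))), Dom_find_unmatched python_idxs matlab_idxs → Pre_find_unmatched python_idxs matlab_idxs → Spec_find_unmatched python_idxs matlab_idxs (find_unmatched python_idxs matlab_idxs)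


-- ===== LEMMAS AND PROOFS =====

-- positions (starting at s) of the trips of l whose canonical key is k, in ascending order
def pvPosFrom (s : Int) (k : List Int) : List (List Int) → List Int
  | [] => []
  | x :: xs => if pvKey x == k then s :: pvPosFrom (s + 1) k xs else pvPosFrom (s + 1) k xs

-- abstract version of B's final pass: l minus, for each value v, its first (f v) occurrences
def pvCSub : List (List Int) → (List Int → Int) → List (List Int)
  | [], _ => []
  | x :: xs, f =>
      if f x > 0 then pvCSub xs (fun v => if v = x then f v - 1 else f v)
      else x :: pvCSub xs f

-- Python's set(t) == set(x) is equality of the canonical keys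
lemma pvL_key_eq (t x : List Int) :
    PySem.Set.equal (PySem.Set.ofList t) (PySem.Set.ofList x) = (pvKey x == pvKey t) := by
  rcases hb : (pvKey x == pvKey t) with _ | _
  · rw [Bool.eq_false_iff]
    intro heq
    rw [PySem.Set.equal_iff] at heq
    have hperm : (PySem.Set.ofList x).Perm (PySem.Set.ofList t) :=
      (List.perm_ext_iff_of_nodup (PySem.Set.nodup_ofList x) (PySem.Set.nodup_ofList t)).2
        (fun a => (heq a).symm)
    have : pvKey x = pvKey t :=
      PySem.List.sorted_eq_sorted_of_perm _ _ _ (fun a b h => h) hperm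
    simp [this] at hb
  · have hk : pvKey x = pvKey t := by simpa using hb
    have hperm : (PySem.Set.ofList x).Perm (PySem.Set.ofList t) := by
      have h1 := (PySem.List.sorted_id_eq_sorted_id_iff_perm (PySem.Set.ofList x) (PySem.Set.ofList t)).1 hk
      exact h1
    rw [PySem.Set.equal_iff]
    exact fun a => hperm.symm.mem_iff

lemma pvL_scanA (M : List (List Int)) (t : List Int) (i : Nat) :
    pvScanA M i t =
      ((M.drop i).findIdx?
        (fun x => PySem.Set.equal (PySem.Set.ofList t) (PySem.Set.ofList x))).map
        (fun off => i + off) := by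
  rw [pvScanA]
  by_cases h : i < M.length
  · rw [List.drop_eq_getElem_cons h, List.findIdx?_cons]
    by_cases hc : PySem.Set.equal (PySem.Set.ofList t) (PySem.Set.ofList M[i]) = true
    · simp [h, hc]
    · simp only [h, dif_pos, hc, Bool.false_eq_true, if_false]
      rw [pvL_scanA M t (i + 1)]
      cases xs : (M.drop (i + 1)).findIdx?
          (fun x => PySem.Set.equal (PySem.Set.ofList t) (PySem.Set.ofList x)) with
      | none => simp
      | some off => simp; omega
  · have : M.drop i = [] := List.drop_eq_nil_of_le (by omega)
    simp [h, this]
termination_by M.length - i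

lemma pvL_posFrom_head (k : List Int) (l : List (List Int)) :
    ∀ s : Int, (pvPosFrom s k l).head? =
      (l.findIdx? (fun x => pvKey x == k)).map (fun off => s + (off : Int)) := by
  induction l with
  | nil => intro s; rfl
  | cons x xs ih =>
    intro s
    by_cases hk : pvKey x == k
    · simp [pvPosFrom, hk, List.findIdx?_cons]
    · simp only [pvPosFrom, hk, Bool.false_eq_true, if_false, List.findIdx?_cons]
      rw [ih (s + 1)]
      cases hfi : xs.findIdx? (fun x => pvKey x == k) with
      | none => simp
      | some off => simp; ring

lemma pvL_posFrom_enum (k : List Int) (l : List (List Int)) :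
    ∀ s : Int,
    (((PySem.List.enumerate l s).map (fun p => (pvKey p.2, p.1))).filter
        (fun p => p.1 == k)).map (fun p => p.2) = pvPosFrom s k l := by
  induction l with
  | nil => intro s; rfl
  | cons x xs ih =>
    intro s
    rw [PySem.List.enumerate_cons]
    by_cases hk : pvKey x == k
    · simp only [List.map_cons, List.filter_cons, hk, if_pos, List.map_cons, pvPosFrom, ih]
    · simp only [List.map_cons, List.filter_cons, pvPosFrom, hk]
      simp [ih]

lemma pvL_buildPos (M : List (List Int)) (k : List Int) :
    (pvBuildPos M).getD k [] = pvPosFrom 0 k M := by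
  unfold pvBuildPos
  have h1 : (PySem.List.enumerate M).foldl
        (fun d jt => d.modify (pvKey jt.2) [] (fun l => l ++ [jt.1])) PySem.Dict.empty
      = ((PySem.List.enumerate M).map (fun p => (pvKey p.2, p.1))).foldl
        (fun d q => d.modify q.1 [] (fun l => l ++ [q.2])) PySem.Dict.empty := by
    rw [List.foldl_map]
  rw [h1, PySem.Dict.getD_foldl_modify_append]
  simp [pvL_posFrom_enum]

lemma pvL_dropWhile_posFrom_self (k : List Int) (l : List (List Int)) (s p : Int) (h : p ≤ s) :
    List.dropWhile (fun x => decide (x < p)) (pvPosFrom s k l) = pvPosFrom s k l := by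
  induction l generalizing s with
  | nil => rfl
  | cons x xs ih =>
    by_cases hk : pvKey x == k
    · simp [pvPosFrom, hk, not_lt.2 h]
    · simp only [pvPosFrom, hk, Bool.false_eq_true, if_false]
      exact ih (s + 1) (by omega)

lemma pvL_dropWhile_posFrom (k : List Int) (l : List (List Int)) :
    ∀ (s pN : Nat), s ≤ pN →
    List.dropWhile (fun x => decide (x < (pN : Int))) (pvPosFrom (s : Int) k l) =
      pvPosFrom (pN : Int) k (l.drop (pN - s)) := by
  induction l with
  | nil => intro s pN h; simp [pvPosFrom]
  | cons x xs ih =>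
    intro s pN h
    rcases Nat.eq_or_lt_of_le h with he | hlt
    · subst he
      rw [Nat.sub_self, List.drop_zero]
      exact pvL_dropWhile_posFrom_self k (x :: xs) s s le_rfl
    · have h1 : ((s : Int) + 1) = ((s + 1 : Nat) : Int) := by push_cast; ring
      have h2 : pN - s = (pN - (s + 1)) + 1 := by omega
      by_cases hk : pvKey x == k
      · simp only [pvPosFrom, hk, List.dropWhile_cons,
          decide_eq_true_eq, show (s : Int) < (pN : Int) by exact_mod_cast hlt, if_pos]
        rw [h1, ih (s + 1) pN hlt, h2]
        rfl
      · simp only [pvPosFrom, hk, Bool.false_eq_true, if_false]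
        rw [h1, ih (s + 1) pN hlt, h2]
        rfl

lemma pvL_erase_drop (l : List (List Int)) : ∀ (n : Nat), (h : n < l.length) →
    (l.erase l[n]).drop n = l.drop (n + 1) := by
  induction l with
  | nil => intro n h; simp at h
  | cons x xs ih =>
    intro n h
    by_cases hx : x = (x :: xs)[n]
    · rw [← hx, List.erase_cons_head]
      cases n with
      | zero => simp
      | succ m =>
        simp only [List.drop_succ_cons]
    · cases n with
      | zero => simp at hx
      | succ m =>
        have hm : m < xs.length := by simpa using h
        have hg : (x :: xs)[m + 1] = xs[m] := by simp
        rw [hg] at hx ⊢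
        rw [List.erase_cons_tail (by simpa using fun hh => hx hh)]
        simp only [List.drop_succ_cons]
        exact ih m hm

-- subtracting nothing keeps the list
lemma pvL_csub_zero (M : List (List Int)) : pvCSub M (fun _ => 0) = M := by
  induction M with
  | nil => rfl
  | cons x xs ih => simp [pvCSub, ih]

-- incrementing the count of v removes the first occurrence of v from the result
lemma pvL_csub_incr (M : List (List Int)) :
    ∀ (f : List Int → Int), (∀ x, 0 ≤ f x) → ∀ v,
    pvCSub M (fun x => if x = v then f x + 1 else f x) = (pvCSub M f).erase v := by
  induction M with
  | nil => intro f _ v; rfl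
  | cons x M' ih =>
    intro f hf v
    by_cases hxv : x = v
    · subst hxv
      have hpos : (if x = x then f x + 1 else f x) > 0 := by
        simp; have := hf x; omega
      rw [pvCSub, if_pos hpos]
      by_cases hfx : f x > 0
      · rw [pvCSub, if_pos hfx]
        have h1 : (fun v_1 => if v_1 = x then (if v_1 = x then f v_1 + 1 else f v_1) - 1
              else if v_1 = x then f v_1 + 1 else f v_1)
            = (fun y => if y = x then (fun z => if z = x then f z - 1 else f z) y + 1
              else (fun z => if z = x then f z - 1 else f z) y) := by
          funext y
          by_cases hy : y = x
          · subst hy; simp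
          · simp [hy]
        rw [h1, ih _ (by intro z; by_cases hz : z = x <;> simp [hz] <;> [omega; exact hf z]) x]
      · rw [pvCSub, if_neg hfx]
        have h1 : (fun v_1 => if v_1 = x then (if v_1 = x then f v_1 + 1 else f v_1) - 1
            else if v_1 = x then f v_1 + 1 else f v_1) = f := by
          funext y; by_cases hy : y = x <;> simp [hy]
        rw [h1, List.erase_cons_head]
    · rw [pvCSub]
      have hfx' : (if x = v then f x + 1 else f x) = f x := by simp [hxv]
      rw [hfx']
      by_cases hfx : f x > 0
      · rw [if_pos hfx, pvCSub, if_pos hfx]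
        have h1 : (fun v_1 => if v_1 = x then (if v_1 = v then f v_1 + 1 else f v_1) - 1
              else if v_1 = v then f v_1 + 1 else f v_1)
            = (fun y => if y = v then (fun z => if z = x then f z - 1 else f z) y + 1
              else (fun z => if z = x then f z - 1 else f z) y) := by
          funext y
          by_cases hy1 : y = x
          · subst hy1; simp [hxv]
          · by_cases hy2 : y = v
            · subst hy2; simp [hy1]
            · simp [hy1, hy2]
        rw [h1, ih _ (by intro z; by_cases hz : z = x <;> simp [hz] <;> [omega; exact hf z]) v]
      · rw [if_neg hfx, pvCSub, if_neg hfx, ih f hf v,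
          List.erase_cons_tail (by simp; exact fun hh => hxv hh)]

-- B's final pass computes the abstract subtraction
lemma pvL_subPass (M : List (List Int)) :
    ∀ (cnt : PySem.Dict (List Int) Int) (acc : List (List Int)),
    (M.foldl pvSubStep (acc, cnt)).1 = acc ++ pvCSub M (fun v => cnt.getD v 0) := by
  induction M with
  | nil => intro cnt acc; simp [pvCSub]
  | cons x M' ih =>
    intro cnt acc
    rw [List.foldl_cons, pvCSub]
    by_cases hx : cnt.getD x 0 > 0
    · rw [if_pos hx]
      have hs : pvSubStep (acc, cnt) x = (acc, cnt.modify x 0 (· - 1)) := by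
        simp [pvSubStep, hx]
      rw [hs, ih]
      congr 2
      funext v
      rw [PySem.Dict.getD_modify]
      by_cases hv : v = x <;> simp [hv]
    · rw [if_neg hx]
      have hs : pvSubStep (acc, cnt) x = (acc ++ [x], cnt) := by
        simp [pvSubStep, hx]
      rw [hs, ih]
      simp

-- the main simulation: A's while-loop against B's fold, one user
lemma pvL_sim (M : List (List Int)) (rest : List (List Int)) :
    ∀ (py_un : List (List Int)) (cnt : PySem.Dict (List Int) Int)
      (pN mi : Nat) (matu : List (List Int)),
      matu = pvCSub M (fun v => cnt.getD v 0) →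
      (∀ v, 0 ≤ cnt.getD v 0) →
      matu.drop mi = M.drop pN →
      (∀ u ∈ py_un, ∀ x ∈ M.drop pN,
        PySem.Set.equal (PySem.Set.ofList u) (PySem.Set.ofList x) = false) →
      pvLoopA (py_un ++ rest) matu py_un.length mi =
        (match rest.foldl (pvStepB (pvBuildPos M) M) ((pN : Int), py_un, cnt) with
         | (_, pu, c) => (pu, pvCSub M (fun v => c.getD v 0))) := by
  induction rest with
  | nil =>
    intro py_un cnt pN mi matu hM _ h3 h2
    rw [pvLoopA, dif_neg (by simp)]
    simpa using hM
  | cons t rest' ih =>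
    intro py_un cnt pN mi matu hM hnn h3 h2
    have hlen : py_un.length < (py_un ++ t :: rest').length := by simp
    have hget : (py_un ++ t :: rest')[py_un.length]'hlen = t := by
      rw [List.getElem_append_right (Nat.le_refl _)]
      simp
    have hpred : (fun x => PySem.Set.equal (PySem.Set.ofList t) (PySem.Set.ofList x)) =
        (fun x => pvKey x == pvKey t) := funext (pvL_key_eq t)
    have hcand : ((pvBuildPos M).getD (pvKey t) []).dropWhile
          (fun x => decide (x < (pN : Int))) = pvPosFrom (pN : Int) (pvKey t) (M.drop pN) := by
      rw [pvL_buildPos]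
      have := pvL_dropWhile_posFrom (pvKey t) M 0 pN (Nat.zero_le _)
      simpa using this
    rw [pvLoopA, dif_pos hlen, hget, pvL_scanA matu t mi, h3, hpred]
    rw [List.foldl_cons]
    cases hfi : (M.drop pN).findIdx? (fun x => pvKey x == pvKey t) with
    | none =>
      -- no match: A moves py_idx on, B records the trip as unmatched
      have hempty : pvPosFrom (pN : Int) (pvKey t) (M.drop pN) = [] := by
        have hh := pvL_posFrom_head (pvKey t) (M.drop pN) ((pN : Int))
        rw [hfi] at hh
        simpa [List.head?_eq_none_iff] using hh
      have hstep : pvStepB (pvBuildPos M) M ((pN : Int), py_un, cnt) t =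
          ((pN : Int), py_un ++ [t], cnt) := by
        simp only [pvStepB]
        rw [hcand, hempty]
      rw [hstep]
      simp only [Option.map_none]
      have hA : py_un ++ t :: rest' = (py_un ++ [t]) ++ rest' := by simp
      have hL : py_un.length + 1 = (py_un ++ [t]).length := by simp
      rw [hA, hL]
      refine ih (py_un ++ [t]) cnt pN mi matu hM hnn h3 ?_
      intro u hu x hx
      rcases List.mem_append.1 hu with hu | hu
      · exact h2 u hu x hx
      · have hu : u = t := by simpa using hu
        subst hu
        rw [pvL_key_eq]
        exact List.findIdx?_eq_none_iff.1 hfi x hx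
    | some off =>
      -- match at offset off of the remaining suffix
      obtain ⟨hofflt, hptrue, -⟩ := List.findIdx?_eq_some_iff_getElem.1 hfi
      have hoffm : off < (matu.drop mi).length := by rw [h3]; exact hofflt
      have hmia : mi + off < matu.length := by
        have := List.length_drop (l := matu) (i := mi)
        omega
      have hMoff : pN + off < M.length := by
        have := List.length_drop (l := M) (i := pN)
        omega
      have hv : matu.getD (mi + off) [] = M[pN + off] := by
        rw [List.getD_eq_getElem _ _ hmia]
        calc matu[mi + off] = (matu.drop mi)[off]'hoffm := by rw [List.getElem_drop]
          _ = (M.drop pN)[off]'hofflt := by congr 1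
          _ = M[pN + off] := by rw [List.getElem_drop]
      have hhead : (pvPosFrom (pN : Int) (pvKey t) (M.drop pN)).head? =
          some ((pN : Int) + off) := by
        have hh := pvL_posFrom_head (pvKey t) (M.drop pN) ((pN : Int))
        rw [hfi] at hh
        simpa using hh
      obtain ⟨tl, htl⟩ := List.head?_eq_some_iff.1 hhead
      have hpg : PySem.List.pyGetD M ((pN : Int) + off) [] = M[pN + off] := by
        have hc : ((pN : Int) + off) = ((pN + off : Nat) : Int) := by push_cast; ring
        rw [hc, PySem.List.pyGetD_natCast]
        exact List.getD_eq_getElem _ _ hMoff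
      have hstep : pvStepB (pvBuildPos M) M ((pN : Int), py_un, cnt) t =
          (((pN : Int) + off) + 1, py_un,
           cnt.modify M[pN + off] 0 (· + 1)) := by
        simp only [pvStepB]
        rw [hcand, htl]
        simp [hpg]
      have htnotin : t ∉ py_un := by
        intro ht
        have hx : (M.drop pN)[off]'hofflt ∈ M.drop pN := List.getElem_mem hofflt
        have := h2 t ht _ hx
        rw [pvL_key_eq, hptrue] at this
        simp at this
      have herase : (py_un ++ t :: rest').erase t = py_un ++ rest' := by
        rw [List.erase_append_right _ htnotin, List.erase_cons_head]
      rw [hstep]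
      simp only [Option.map_some]
      rw [herase, hv]
      have hcast : ((pN : Int) + off) + 1 = ((pN + off + 1 : Nat) : Int) := by push_cast; ring
      rw [hcast]
      have hcntf : (fun v => (cnt.modify M[pN + off] 0 (· + 1)).getD v 0) =
          (fun v => if v = M[pN + off] then cnt.getD v 0 + 1 else cnt.getD v 0) := by
        funext v
        rw [PySem.Dict.getD_modify]
        by_cases hy : v = M[pN + off] <;> simp [hy]
      refine ih py_un (cnt.modify M[pN + off] 0 (· + 1)) (pN + off + 1) (mi + off)
        (matu.erase M[pN + off]) ?_ ?_ ?_ ?_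
      · rw [hcntf, pvL_csub_incr M _ hnn, ← hM]
      · intro v
        rw [PySem.Dict.getD_modify]
        by_cases hy : v = M[pN + off] <;> simp [hy] <;> [skip; exact hnn v]
        have := hnn M[pN + off]; omega
      · have h5 := pvL_erase_drop matu (mi + off) hmia
        have h6 : matu[mi + off] = M[pN + off] := by
          rw [← List.getD_eq_getElem _ ([] : List Int) hmia, hv]
        rw [h6] at h5
        rw [h5]
        have h7 : matu.drop (mi + off + 1) = (matu.drop mi).drop (off + 1) := by
          rw [List.drop_drop, Nat.add_assoc]
        rw [h7, h3, List.drop_drop, ← Nat.add_assoc]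
      · intro u hu x hx
        have hx' : x ∈ M.drop pN := by
          have h8 : M.drop (pN + off + 1) = (M.drop pN).drop (off + 1) := by
            rw [List.drop_drop, Nat.add_assoc]
          rw [h8] at hx
          exact List.mem_of_mem_drop hx
        exact h2 u hu x hx'

lemma pvL_user (P M : List (List Int)) : pvLoopA P M 0 0 = pvMatchUser P M := by
  have hz : (fun v => (PySem.Dict.empty : PySem.Dict (List Int) Int).getD v 0) =
      (fun _ => (0 : Int)) := by
    funext v; rw [PySem.Dict.getD_empty]
  have h := pvL_sim M P [] PySem.Dict.empty 0 0 M
    (by rw [hz, pvL_csub_zero]) (fun v => by rw [PySem.Dict.getD_empty]) rfl (by simp)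
  simp only [Nat.cast_zero, List.nil_append, List.length_nil] at h
  unfold pvMatchUser
  rcases hfold : List.foldl (pvStepB (pvBuildPos M) M) ((0 : Int), [], PySem.Dict.empty) P
    with ⟨a, pu, c⟩
  rw [hfold] at h
  rw [h]
  simp [pvL_subPass M c []]

lemma pvL_outer (py mat : List (List (List Int))) (hlen : py.length ≤ mat.length) :
    ∀ (i : Nat), i ≤ py.length → ∀ (pacc macc : List (List (List Int))),
    pvOuterA py mat i pacc macc =
      ((py.drop i).zip (mat.drop i)).foldl
        (fun acc pm => match pvMatchUser pm.1 pm.2 with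
          | (pu, mu) => (acc.1 ++ [pu], acc.2 ++ [mu])) (pacc, macc) := by
  intro i
  induction hn : py.length - i generalizing i with
  | zero =>
    intro hi pacc macc
    have hie : i = py.length := by omega
    subst hie
    rw [pvOuterA, dif_neg (by omega)]
    rw [List.drop_eq_nil_of_le (Nat.le_refl _)]
    rfl
  | succ n ihn =>
    intro hi pacc macc
    have hlt : i < py.length := by omega
    have hmt : i < mat.length := by omega
    rw [pvOuterA, dif_pos hlt]
    rw [List.drop_eq_getElem_cons hlt, List.drop_eq_getElem_cons hmt,
      List.zip_cons_cons, List.foldl_cons]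
    have hgd : mat.getD i [] = mat[i] := List.getD_eq_getElem _ _ hmt
    rw [hgd, pvL_user]
    rw [ihn (i + 1) (by omega) (by omega)]

-- ===== VERDICT (by name: the statement is the Claim_ definition above) =====
theorem find_unmatched_spec : Claim_equal_find_unmatched := by
  intro py mat _ hpre
  unfold Spec_find_unmatched find_unmatched find_unmatched_alt
  rw [pvL_outer py mat hpre 0 (Nat.zero_le _)]
  simp
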